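-- pv_equiv track=rewrite | github.com/0sm1um/pathfinder | dataset_generation.py | relative2motionmodel
-- ===== SOURCE A (Python) =====
-- def relative2motionmodel(relativePath):
--     models = [relativePath[0]]
--     for i in range(1,len(relativePath)): # First entry has no direction and is labelled 'Start'
--         if relativePath[i] != relativePath[i-1]: # Check if a turn occured
--             if relativePath[i-1] == 'Up' and relativePath[i] == 'Right':
--                 models.append('Right Turn')
--             elif relativePath[i-1] == 'Right' and relativePath[i] == 'Down':
--                 models.append('Right Turn')
--             elif relativePath[i-1] == 'Down' and relativePath[i] == 'Left':
--                 models.append('Right Turn')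
--             elif relativePath[i-1] == 'Left' and relativePath[i] == 'Up':
--                 models.append('Right Turn')
--             else:
--                 models.append('Left Turn') # 2 Denotes Left Turn
--         else:
--             models.append(relativePath[i])
--     return models
-- ===== SOURCE B (Python) =====
-- def relative2motionmodel(relativePath):
--     # Two-phase: run-length encode the path, then expand runs into labels.
--     RIGHT = {('Up', 'Right'), ('Right', 'Down'), ('Down', 'Left'), ('Left', 'Up')}
--     runs = []
--     i, n = 0, len(relativePath)
--     while i < n:
--         j = i + 1
--         while j < n and relativePath[j] == relativePath[i]:
--             j += 1
--         runs.append((relativePath[i], j - i))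
--         i = j
--     out = []
--     prev = None
--     for d, k in runs:
--         if prev is None:
--             out.append(d)
--         else:
--             out.append('Right Turn' if (prev, d) in RIGHT else 'Left Turn')
--         out.extend([d] * (k - 1))
--         prev = d
--     return out
-- ===== Notes on version B (the rewrite author's own statement) =====
-- stated objective: alternative
-- what changed: Replaces A's single indexed pairwise scan with if/elif chains by a two-phase algorithm: run-length encode the path into maximal runs of equal directions, then expand each run by a fold over the run list into one boundary turn label (set membership in the four clockwise pairs) plus n-1 copies of the direction.
import Mathlib
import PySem

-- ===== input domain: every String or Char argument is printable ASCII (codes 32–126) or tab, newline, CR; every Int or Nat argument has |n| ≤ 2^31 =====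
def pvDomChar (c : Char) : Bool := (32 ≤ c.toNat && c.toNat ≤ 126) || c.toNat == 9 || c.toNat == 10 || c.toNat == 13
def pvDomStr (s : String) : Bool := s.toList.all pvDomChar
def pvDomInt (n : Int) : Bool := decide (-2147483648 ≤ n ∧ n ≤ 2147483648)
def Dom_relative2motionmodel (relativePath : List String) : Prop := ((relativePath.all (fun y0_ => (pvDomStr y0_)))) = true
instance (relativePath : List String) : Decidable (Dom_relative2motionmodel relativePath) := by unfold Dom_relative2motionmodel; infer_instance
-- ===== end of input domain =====

-- B replaces A's indexed pairwise scan (if/elif chain) by a two-phase algorithm: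
-- run-length encoding into maximal runs, then a fold over the runs expanding each into a
-- boundary turn label plus copies of the direction (alternative; same O(n) cost).

-- ===== PORT A =====
-- the if/elif chain of A's loop body (branches in A's order)
def pvClassifyA (prev cur : String) : String :=
  if prev = "Up" ∧ cur = "Right" then "Right Turn"
  else if prev = "Right" ∧ cur = "Down" then "Right Turn"
  else if prev = "Down" ∧ cur = "Left" then "Right Turn"
  else if prev = "Left" ∧ cur = "Up" then "Right Turn"
  else "Left Turn"

def relative2motionmodel (relativePath : List String) : List String :=
  -- relativePath[0]: pyGet? is none only on the empty list, which Pre_ excludes (A raises IndexError there)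
  let models := [(PySem.List.pyGet? relativePath 0).getD ""]
  (PySem.List.pyRange 1 relativePath.length 1).foldl
    (fun models i =>
      let prev := (PySem.List.pyGet? relativePath (i - 1)).getD ""
      let cur  := (PySem.List.pyGet? relativePath i).getD ""
      if cur ≠ prev then models ++ [pvClassifyA prev cur]
      else models ++ [cur]) models

-- ===== PORT B =====
-- the RIGHT set of the four clockwise direction pairs
def pvRight : PySem.Set (String × String) :=
  PySem.Set.ofList [("Up", "Right"), ("Right", "Down"), ("Down", "Left"), ("Left", "Up")]

-- Source B's run scanner: the outer while loop starts a run at index i, the inner while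
-- advances j over entries equal to relativePath[i]; takeWhile/dropWhile is that scan
-- (run length j-i = takeWhile prefix length + 1, next position = the dropWhile suffix)
def pvRuns : List String → List (String × Nat)
  | [] => []
  | d :: rest =>
    (d, (rest.takeWhile (· == d)).length + 1) :: pvRuns (rest.dropWhile (· == d))
termination_by xs => xs.length
decreasing_by
  simp only [List.length_cons]
  exact Nat.lt_succ_of_le (rest.length_dropWhile_le _)

-- Source B's second loop body: state (out, prev); per run emit a boundary label
-- (the direction itself for the first run) plus k-1 copies of the direction
def pvEmitStep (st : List String × Option String) (r : String × Nat) : List String × Option String :=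
  (st.1 ++
    [(match st.2 with
      | none => r.1
      | some p => if PySem.Set.contains pvRight (p, r.1) then "Right Turn" else "Left Turn")]
    ++ List.replicate (r.2 - 1) r.1, some r.1)

def relative2motionmodel_alt (relativePath : List String) : List String :=
  ((pvRuns relativePath).foldl pvEmitStep ([], none)).1

-- ===== PRECONDITION & SPEC =====
-- Pre_ excludes only the empty list, on which A raises IndexError at relativePath[0]
def Pre_relative2motionmodel (relativePath : List String) : Prop := relativePath ≠ []
instance (relativePath : List String) : Decidable (Pre_relative2motionmodel relativePath) := by
  unfold Pre_relative2motionmodel; infer_instance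
def pvWitness_relative2motionmodel : List String := ["Up", "Right", "Right", "Down"]

def Spec_relative2motionmodel (relativePath : List String) (out : List String) : Prop := out = relative2motionmodel_alt relativePath
instance (relativePath : List String) (out : List String) : Decidable (Spec_relative2motionmodel relativePath out) := by unfold Spec_relative2motionmodel; infer_instance

-- ===== CLAIM (what is proved, stated in full; the proofs are below) =====
def Claim_equal_relative2motionmodel : Prop := ∀ (relativePath : List String), Dom_relative2motionmodel relativePath → Pre_relative2motionmodel relativePath → Spec_relative2motionmodel relativePath (relative2motionmodel relativePath)

-- ===== LEMMAS AND PROOFS =====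

-- recursive form of B's second loop (the foldl is related to it by pvFoldl_emit)
def pvEmit : Option String → List (String × Nat) → List String
  | _, [] => []
  | prev, (d, n) :: rest =>
    (match prev with
     | none => d
     | some p => if PySem.Set.contains pvRight (p, d) then "Right Turn" else "Left Turn")
      :: (List.replicate (n - 1) d ++ pvEmit (some d) rest)

-- the foldl of B's loop body accumulates exactly pvEmit's output
theorem pvFoldl_emit : ∀ (rs : List (String × Nat)) (out : List String) (prev : Option String),
    (rs.foldl pvEmitStep (out, prev)).1 = out ++ pvEmit prev rs := by
  intro rs
  induction rs with
  | nil => intro out prev; simp [pvEmit]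
  | cons r rest ih =>
    intro out prev
    cases r with
    | mk d n =>
      simp only [List.foldl_cons, pvEmitStep, ih, pvEmit]
      cases prev <;> simp

-- A's per-pair step (the loop body's value appended for adjacent pair (prev, cur))
def pvStepA (prev cur : String) : String :=
  if cur ≠ prev then pvClassifyA prev cur else cur

-- the sequence of A's step values along a list, seeded with a previous direction
def pvPairsMap : String → List String → List String
  | _, [] => []
  | p, c :: rest => pvStepA p c :: pvPairsMap c rest

-- B's boundary label agrees with A's step label whenever the directions differ
theorem pvLabel_eq (p c : String) (h : c ≠ p) :
    (if PySem.Set.contains pvRight (p, c) then "Right Turn" else "Left Turn") = pvStepA p c := by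
  unfold pvStepA
  rw [if_pos h]
  have hmem : PySem.Set.contains pvRight (p, c) = true ↔
      ((p = "Up" ∧ c = "Right") ∨ (p = "Right" ∧ c = "Down") ∨
       (p = "Down" ∧ c = "Left") ∨ (p = "Left" ∧ c = "Up")) := by
    unfold pvRight
    rw [PySem.Set.contains_iff, PySem.Set.mem_ofList]
    simp [Prod.ext_iff]
  by_cases hb : PySem.Set.contains pvRight (p, c) = true
  · rw [if_pos hb]
    rcases hmem.mp hb with ⟨rfl, rfl⟩ | ⟨rfl, rfl⟩ | ⟨rfl, rfl⟩ | ⟨rfl, rfl⟩ <;> decide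
  · rw [if_neg hb]
    unfold pvClassifyA
    split_ifs with h1 h2 h3 h4
    · exact absurd (hmem.mpr (Or.inl h1)) hb
    · exact absurd (hmem.mpr (Or.inr (Or.inl h2))) hb
    · exact absurd (hmem.mpr (Or.inr (Or.inr (Or.inl h3)))) hb
    · exact absurd (hmem.mpr (Or.inr (Or.inr (Or.inr h4)))) hb
    · rfl

-- repeating the same direction contributes itself at each step
theorem pvPairsMap_same (c : String) :
    ∀ (same t : List String), (∀ x ∈ same, x = c) →
      pvPairsMap c (same ++ t) = List.replicate same.length c ++ pvPairsMap c t := by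
  intro same
  induction same with
  | nil => intro t _; simp
  | cons a as ih =>
    intro t h
    have ha : a = c := h a (by simp)
    subst ha
    simp only [List.cons_append, pvPairsMap, List.length_cons, List.replicate_succ,
      ih t (fun x hx => h x (by simp [hx]))]
    have : pvStepA a a = a := by unfold pvStepA; simp
    rw [this]

-- B's expansion of the run-length encoding computes A's pairwise step sequence
theorem pvEmit_runs : ∀ (n : Nat) (xs : List String), xs.length ≤ n → ∀ (p : String),
    (∀ h : xs ≠ [], xs.head h ≠ p) →
    pvEmit (some p) (pvRuns xs) = pvPairsMap p xs := by
  intro n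
  induction n with
  | zero =>
    intro xs hn p _
    have : xs = [] := List.eq_nil_of_length_eq_zero (Nat.le_zero.mp hn)
    subst this; rw [pvRuns]; rfl
  | succ n ih =>
    intro xs hn p hhead
    cases xs with
    | nil => rw [pvRuns]; rfl
    | cons c rest =>
      have hcp : c ≠ p := hhead (by simp)
      have hsplit : rest.takeWhile (· == c) ++ rest.dropWhile (· == c) = rest :=
        List.takeWhile_append_dropWhile
      have hsame : ∀ x ∈ rest.takeWhile (· == c), x = c := by
        intro x hx
        have := List.mem_takeWhile_imp hx
        simpa using this
      rw [pvRuns]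
      simp only [pvEmit, Nat.add_sub_cancel]
      rw [pvLabel_eq p c hcp]
      have hdroplen : (rest.dropWhile (· == c)).length ≤ n := by
        have h1 := rest.length_dropWhile_le (· == c)
        have h2 : rest.length ≤ n := by simpa using Nat.succ_le_succ_iff.mp hn
        omega
      have hdrophead : ∀ h : rest.dropWhile (· == c) ≠ [], (rest.dropWhile (· == c)).head h ≠ c := by
        intro h
        have := List.head_dropWhile_not (· == c) h
        simpa using this
      rw [ih _ hdroplen c hdrophead]
      show pvStepA p c :: (List.replicate (rest.takeWhile (· == c)).length c ++
          pvPairsMap c (rest.dropWhile (· == c))) = pvPairsMap p (c :: rest)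
      rw [← pvPairsMap_same c _ _ hsame, hsplit]
      rfl

-- A's result on a nonempty list is the head followed by the pairwise step sequence
theorem pvLoopA (rp : List String) : ∀ (n j : Nat) (acc : List String), 1 ≤ j → rp.length - j = n →
    (PySem.List.pyRange (j : Int) rp.length 1).foldl
      (fun models i =>
        let prev := (PySem.List.pyGet? rp (i - 1)).getD ""
        let cur  := (PySem.List.pyGet? rp i).getD ""
        if cur ≠ prev then models ++ [pvClassifyA prev cur]
        else models ++ [cur]) acc
    = acc ++ ((rp.drop (j - 1)).zip (rp.drop j)).map
        (fun pc => if pc.2 ≠ pc.1 then pvClassifyA pc.1 pc.2 else pc.2) := by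
  intro n
  induction n with
  | zero =>
    intro j acc hj hn
    rw [PySem.List.pyRange_one_eq_nil (by omega)]
    have h0 : rp.drop j = [] := List.drop_eq_nil_of_le (by omega)
    simp only [List.foldl_nil, h0, List.zip_nil_right, List.map_nil, List.append_nil]
  | succ n ih =>
    intro j acc hj hn
    have hlt : j < rp.length := by omega
    rw [PySem.List.pyRange_one_cons (by exact_mod_cast hlt)]
    simp only [List.foldl_cons]
    have h1 : ((j : Int) - 1) = ((j - 1 : Nat) : Int) := by omega
    have h2 : ((j : Int) + 1) = ((j + 1 : Nat) : Int) := by omega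
    rw [h1, h2, ih (j + 1) _ (by omega) (by omega)]
    have hj1 : j - 1 < rp.length := by omega
    have hdrop1 : rp.drop (j - 1) = rp[j - 1] :: rp.drop j := by
      rw [List.drop_eq_getElem_cons hj1]
      congr 2
      omega
    have hdrop2 : rp.drop j = rp[j] :: rp.drop (j + 1) := List.drop_eq_getElem_cons hlt
    have h3 : j + 1 - 1 = j := by omega
    rw [h3, hdrop1, hdrop2, List.zip_cons_cons, List.map_cons, ← hdrop2]
    simp only [PySem.List.pyGet?_natCast, List.getElem?_eq_getElem hj1,
      List.getElem?_eq_getElem hlt, Option.getD_some]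
    split_ifs <;> simp only [List.append_assoc, List.singleton_append]

-- the zip-map form of A's tail equals pvPairsMap
theorem pvZip_eq_pairsMap (p : String) : ∀ (xs : List String),
    ((p :: xs).zip xs).map
      (fun pc => if pc.2 ≠ pc.1 then pvClassifyA pc.1 pc.2 else pc.2) = pvPairsMap p xs := by
  intro xs
  induction xs generalizing p with
  | nil => rfl
  | cons c rest ih =>
    simp only [List.zip_cons_cons, List.map_cons, pvPairsMap, ih c]
    rfl

-- ===== VERDICT (by name: the statement is the Claim_ definition above) =====
theorem relative2motionmodel_spec : Claim_equal_relative2motionmodel := by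
  intro rp _ hpre
  unfold Spec_relative2motionmodel
  obtain ⟨x, xs, rfl⟩ : ∃ x xs, rp = x :: xs := by
    cases rp with
    | nil => exact absurd rfl hpre
    | cons a l => exact ⟨a, l, rfl⟩
  have h := pvLoopA (x :: xs) xs.length 1 [x] (by omega) (by simp)
  simp only [Nat.cast_one, Nat.sub_self, List.drop_zero, List.drop_one, List.tail_cons] at h
  unfold relative2motionmodel relative2motionmodel_alt
  simp only [PySem.List.pyGet?_zero_cons, Option.getD_some]
  rw [h, pvZip_eq_pairsMap, pvFoldl_emit]
  rw [pvRuns]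
  simp only [pvEmit, Nat.add_sub_cancel]
  have hsame : ∀ y ∈ xs.takeWhile (· == x), y = x := by
    intro y hy
    have := List.mem_takeWhile_imp hy
    simpa using this
  have hdrophead : ∀ h : xs.dropWhile (· == x) ≠ [], (xs.dropWhile (· == x)).head h ≠ x := by
    intro h
    have := List.head_dropWhile_not (· == x) h
    simpa using this
  rw [pvEmit_runs (xs.dropWhile (· == x)).length _ le_rfl x hdrophead]
  rw [← pvPairsMap_same x _ _ hsame, List.takeWhile_append_dropWhile]
  rfl
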